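-- pv_equiv track=rewrite | github.com/toniIepure25/NeuroVerse | backend/app/safety/safety_gate.py | _has_contradictory_actions
-- ===== SOURCE A (Python) =====
-- _OPPOSING_PAIRS = {
--     "IncreaseSceneClarity": "SimplifyEnvironment",
--     "SimplifyEnvironment": "IncreaseSceneClarity",
--     "SmoothEnvironmentMotion": "StabilizeVisualField",
--     "StabilizeVisualField": "SmoothEnvironmentMotion",
-- }
--
-- def _has_contradictory_actions(history: list[str], window: int = 4) -> bool:
--     recent = history[-window:] if len(history) >= window else history
--     if len(recent) < 2:
--         return False
--     for i in range(len(recent) - 1):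
--         if recent[i] in _OPPOSING_PAIRS and _OPPOSING_PAIRS[recent[i]] in recent[i + 1 :]:
--             return True
--     return False
-- ===== SOURCE B (Python) =====
-- _OPPOSING_PAIRS = {
--     "IncreaseSceneClarity": "SimplifyEnvironment",
--     "SimplifyEnvironment": "IncreaseSceneClarity",
--     "SmoothEnvironmentMotion": "StabilizeVisualField",
--     "StabilizeVisualField": "SmoothEnvironmentMotion",
-- }
--
-- def _has_contradictory_actions(history: list[str], window: int = 4) -> bool:
--     # One forward pass: remember actions seen so far; a contradiction exists
--     # exactly when some action's opposing partner appeared earlier in the window.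
--     recent = history[-window:] if len(history) >= window else history
--     seen = set()
--     for action in recent:
--         partner = _OPPOSING_PAIRS.get(action)
--         if partner is not None and partner in seen:
--             return True
--         seen.add(action)
--     return False
-- ===== Notes on version B (the rewrite author's own statement) =====
-- stated objective: alternative
-- what changed: Replaced the nested scan (for each window index, a membership test over the tail slice) with a single forward pass that keeps a set of actions seen so far and fires when an action's opposing partner was already seen, relying on _OPPOSING_PAIRS being a symmetric involution.
import Mathlib
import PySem

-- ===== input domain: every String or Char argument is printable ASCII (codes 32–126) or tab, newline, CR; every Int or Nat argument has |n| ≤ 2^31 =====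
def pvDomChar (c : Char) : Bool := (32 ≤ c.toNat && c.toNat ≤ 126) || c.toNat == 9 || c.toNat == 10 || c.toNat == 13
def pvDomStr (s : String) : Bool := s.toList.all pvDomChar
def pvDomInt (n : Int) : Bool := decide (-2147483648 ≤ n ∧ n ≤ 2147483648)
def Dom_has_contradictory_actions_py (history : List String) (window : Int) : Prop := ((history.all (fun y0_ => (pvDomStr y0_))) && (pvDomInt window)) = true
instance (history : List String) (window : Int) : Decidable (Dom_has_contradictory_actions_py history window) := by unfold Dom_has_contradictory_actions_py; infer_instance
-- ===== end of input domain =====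

-- B replaces A's nested tail-slice scan of the window by a single forward pass
-- that remembers the actions seen so far in a set.

-- ===== PORT A =====
-- _OPPOSING_PAIRS, the module-level dict both implementations use
def oppDict : PySem.Dict String String := PySem.Dict.ofList [
  ("IncreaseSceneClarity", "SimplifyEnvironment"),
  ("SimplifyEnvironment", "IncreaseSceneClarity"),
  ("SmoothEnvironmentMotion", "StabilizeVisualField"),
  ("StabilizeVisualField", "SmoothEnvironmentMotion")]

def has_contradictory_actions_py (history : List String) (window : Int) : Bool :=
  -- recent = history[-window:] if len(history) >= window else history
  let recent := if PySem.List.len history ≥ window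
                then PySem.List.slice history (some (-window)) none
                else history
  if PySem.List.len recent < 2 then false
  else
    -- for i in range(len(recent) - 1): if recent[i] in _OPPOSING_PAIRS and _OPPOSING_PAIRS[recent[i]] in recent[i+1:]: return True
    (PySem.List.pyRange 0 (PySem.List.len recent - 1) 1).any (fun i =>
      oppDict.contains (PySem.List.pyGetD recent i "") &&
      (PySem.List.slice recent (some (i + 1)) none).contains
        (oppDict.getD (PySem.List.pyGetD recent i "") ""))

-- ===== PORT B =====
-- the 'for action in recent' loop of B: seen-set forward pass with early return
def altLoop (seen : PySem.Set String) : List String → Bool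
  | [] => false
  | action :: rest =>
    match oppDict.get? action with          -- partner = _OPPOSING_PAIRS.get(action)
    | some partner =>
      if PySem.Set.contains seen partner then true
      else altLoop (PySem.Set.add seen action) rest
    | none => altLoop (PySem.Set.add seen action) rest

def has_contradictory_actions_py_alt (history : List String) (window : Int) : Bool :=
  let recent := if PySem.List.len history ≥ window
                then PySem.List.slice history (some (-window)) none
                else history
  altLoop PySem.Set.empty recent

-- ===== PRECONDITION & SPEC =====
def Spec_has_contradictory_actions_py (history : List String) (window : Int) (out : Bool) : Prop := out = has_contradictory_actions_py_alt history window
instance (history : List String) (window : Int) (out : Bool) : Decidable (Spec_has_contradictory_actions_py history window out) := by unfold Spec_has_contradictory_actions_py; infer_instance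

-- ===== CLAIM (what is proved, stated in full; the proofs are below) =====
def Claim_equal_has_contradictory_actions_py : Prop := ∀ (history : List String) (window : Int), Dom_has_contradictory_actions_py history window → Spec_has_contradictory_actions_py history window (has_contradictory_actions_py history window)

-- ===== LEMMAS AND PROOFS =====

-- oppDict lookup, written out
theorem opp_get (x : String) : oppDict.get? x =
    (if x = "IncreaseSceneClarity" then some "SimplifyEnvironment"
     else if x = "SimplifyEnvironment" then some "IncreaseSceneClarity"
     else if x = "SmoothEnvironmentMotion" then some "StabilizeVisualField"
     else if x = "StabilizeVisualField" then some "SmoothEnvironmentMotion"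
     else none) := by
  have h : oppDict.items = [
    ("IncreaseSceneClarity", "SimplifyEnvironment"),
    ("SimplifyEnvironment", "IncreaseSceneClarity"),
    ("SmoothEnvironmentMotion", "StabilizeVisualField"),
    ("StabilizeVisualField", "SmoothEnvironmentMotion")] := by decide
  simp [PySem.Dict.get?, h, List.find?]
  split_ifs <;> simp_all [beq_eq_decide, eq_comm]

-- _OPPOSING_PAIRS is a symmetric involution
theorem opp_symm {x y : String} (h : oppDict.get? x = some y) : oppDict.get? y = some x := by
  rw [opp_get] at h; rw [opp_get]
  split_ifs at h <;> (simp at h; subst h; simp_all)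

theorem dict_contains_eq_isSome (d : PySem.Dict String String) (k : String) :
    d.contains k = (d.get? k).isSome := by
  simp only [PySem.Dict.contains, PySem.Dict.get?, Option.isSome_map]
  induction d.items with
  | nil => rfl
  | cons p t ih => cases hp : (p.1 == k) <;> simp [hp, ih]

theorem dict_getD_eq_get?_getD (d : PySem.Dict String String) (k dflt : String) :
    d.getD k dflt = (d.get? k).getD dflt := by
  simp [PySem.Dict.getD, PySem.Dict.get?]

-- A's inner loop, restated as a structural recursion over the window
def aRec : List String → Bool
  | [] => false
  | x :: rest =>
    (match oppDict.get? x with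
     | some y => rest.contains y
     | none => false) || aRec rest

-- the loop body of A at natural index k, as a function of the list
def aStep (l : List String) (k : Nat) : Bool :=
  match oppDict.get? (l.getD k "") with
  | some y => (l.drop (k + 1)).contains y
  | none => false

theorem aStep_cons_succ (x : String) (l : List String) (k : Nat) :
    aStep (x :: l) (k + 1) = aStep l k := by
  simp [aStep]

theorem rangeAny_eq_aRec (l : List String) :
    (List.range (l.length - 1)).any (aStep l) = aRec l := by
  induction l with
  | nil => rfl
  | cons x rest ih =>
    cases rest with
    | nil =>
      simp only [List.length_cons, List.length_nil]
      rw [show (0 + 1 - 1 : Nat) = 0 from rfl, List.range_zero]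
      simp only [List.any_nil, aRec, Bool.or_false]
      cases oppDict.get? x <;> simp
    | cons h2 t2 =>
      have hL : (x :: h2 :: t2).length - 1 = t2.length + 1 := by simp
      rw [hL, List.range_succ_eq_map, List.any_cons, List.any_map]
      have hf : (aStep (x :: h2 :: t2) ∘ Nat.succ) = aStep (h2 :: t2) :=
        funext fun k => aStep_cons_succ x (h2 :: t2) k
      rw [hf]
      have hL2 : (h2 :: t2).length - 1 = t2.length := by simp
      rw [hL2] at ih
      rw [ih]
      have h0 : aStep (x :: h2 :: t2) 0 =
          (match oppDict.get? x with
           | some y => (h2 :: t2).contains y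
           | none => false) := by
        simp [aStep]
      rw [h0]
      conv_rhs => rw [aRec]

-- A's index loop over pyRange equals the Nat-range loop over aStep
theorem pyAny_eq_rangeAny (l : List String) :
    ((PySem.List.pyRange 0 ((l.length : Int) - 1) 1).any (fun i =>
      oppDict.contains (PySem.List.pyGetD l i "") &&
      (PySem.List.slice l (some (i + 1)) none).contains
        (oppDict.getD (PySem.List.pyGetD l i "") ""))) =
    (List.range (l.length - 1)).any (aStep l) := by
  rw [PySem.List.pyRange_one, List.any_map]
  congr 1
  · congr 1; omega
  · funext k
    show (oppDict.contains (PySem.List.pyGetD l ((0 : Int) + (k : Int)) "") &&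
      (PySem.List.slice l (some (((0 : Int) + (k : Int)) + 1)) none).contains
        (oppDict.getD (PySem.List.pyGetD l ((0 : Int) + (k : Int)) "") "")) = aStep l k
    have hk : ((0 : Int) + (k : Int)) = (k : Int) := by ring
    rw [hk]
    have h1 : ((k : Int) + 1) = ((k + 1 : Nat) : Int) := by push_cast; ring
    rw [h1, PySem.List.slice_from_natCast]
    simp only [PySem.List.pyGetD_natCast, dict_contains_eq_isSome, dict_getD_eq_get?_getD]
    simp only [List.getD] at *
    cases h : oppDict.get? (l[k]?.getD "") <;> simp [aStep, List.getD, h]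

-- the symmetric "some opposing pair occurs in order" proposition
def EProp (l : List String) : Prop :=
  ∃ pre x mid y post, l = pre ++ x :: mid ++ y :: post ∧ oppDict.get? x = some y

theorem aRec_iff (l : List String) : aRec l = true ↔ EProp l := by
  induction l with
  | nil =>
    simp only [aRec, EProp]
    constructor
    · intro h; cases h
    · rintro ⟨pre, x, mid, y, post, h, -⟩
      exact absurd h.symm (by simp)
  | cons x rest ih =>
    have step : aRec (x :: rest) = true ↔
        ((∃ y, oppDict.get? x = some y ∧ y ∈ rest) ∨ aRec rest = true) := by
      cases h : oppDict.get? x <;> simp [aRec, h]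
    rw [step, ih]
    constructor
    · rintro (⟨y, hxy, hy⟩ | hE)
      · obtain ⟨mid, post, rfl⟩ := List.append_of_mem hy
        exact ⟨[], x, mid, y, post, by simp, hxy⟩
      · obtain ⟨pre, a, mid, y, post, rfl, h⟩ := hE
        exact ⟨x :: pre, a, mid, y, post, by simp, h⟩
    · rintro ⟨pre, a, mid, y, post, hl, h⟩
      cases pre with
      | nil =>
        simp only [List.nil_append] at hl
        obtain ⟨rfl, rfl⟩ := hl
        exact Or.inl ⟨y, h, by simp⟩
      | cons p ps =>
        simp only [List.cons_append, List.cons.injEq] at hl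
        obtain ⟨rfl, rfl⟩ := hl
        exact Or.inr ⟨ps, a, mid, y, post, rfl, h⟩

theorem altLoop_iff (l : List String) : ∀ seen : PySem.Set String,
    altLoop seen l = true ↔
    ∃ pre x post y, l = pre ++ x :: post ∧ oppDict.get? x = some y ∧ (y ∈ seen ∨ y ∈ pre) := by
  induction l with
  | nil =>
    intro seen
    simp only [altLoop]
    constructor
    · intro h; cases h
    · rintro ⟨pre, x, post, y, h, -, -⟩
      exact absurd h.symm (by simp)
  | cons a rest ih =>
    intro seen
    have hsplit : (∃ pre x post y, a :: rest = pre ++ x :: post ∧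
        oppDict.get? x = some y ∧ (y ∈ seen ∨ y ∈ pre)) ↔
        ((∃ y, oppDict.get? a = some y ∧ y ∈ seen) ∨
         (∃ pre x post y, rest = pre ++ x :: post ∧ oppDict.get? x = some y ∧
           (y ∈ seen ∨ y = a ∨ y ∈ pre))) := by
      constructor
      · rintro ⟨pre, x, post, y, hl, hx, hy⟩
        cases pre with
        | nil =>
          simp only [List.nil_append, List.cons.injEq] at hl
          obtain ⟨rfl, rfl⟩ := hl
          rcases hy with hy | hy
          · exact Or.inl ⟨y, hx, hy⟩
          · cases hy
        | cons p ps =>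
          simp only [List.cons_append, List.cons.injEq] at hl
          obtain ⟨rfl, rfl⟩ := hl
          refine Or.inr ⟨ps, x, post, y, rfl, hx, ?_⟩
          rcases hy with hy | hy
          · exact Or.inl hy
          · rcases List.mem_cons.mp hy with hy | hy
            · exact Or.inr (Or.inl hy)
            · exact Or.inr (Or.inr hy)
      · rintro (⟨y, hx, hy⟩ | ⟨pre, x, post, y, rfl, hx, hy⟩)
        · exact ⟨[], a, rest, y, rfl, hx, Or.inl hy⟩
        · refine ⟨a :: pre, x, post, y, rfl, hx, ?_⟩
          rcases hy with hy | hy | hy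
          · exact Or.inl hy
          · exact Or.inr (by simp [hy])
          · exact Or.inr (by simp [hy])
    rw [hsplit]
    have hmem : ∀ y, y ∈ PySem.Set.add seen a ↔ (y ∈ seen ∨ y = a) := by
      intro y; exact PySem.Set.mem_add seen a y
    cases h : oppDict.get? a with
    | none =>
      simp only [altLoop, h]
      rw [ih (PySem.Set.add seen a)]
      constructor
      · rintro ⟨pre, x, post, y, rfl, hx, hy⟩
        refine Or.inr ⟨pre, x, post, y, rfl, hx, ?_⟩
        rcases hy with hy | hy
        · rcases (hmem y).mp hy with h' | h'
          · exact Or.inl h'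
          · exact Or.inr (Or.inl h')
        · exact Or.inr (Or.inr hy)
      · rintro (⟨y, hx, -⟩ | ⟨pre, x, post, y, rfl, hx, hy⟩)
        · exact absurd hx (by simp)
        · refine ⟨pre, x, post, y, rfl, hx, ?_⟩
          rcases hy with hy | hy | hy
          · exact Or.inl ((hmem y).mpr (Or.inl hy))
          · exact Or.inl ((hmem y).mpr (Or.inr hy))
          · exact Or.inr hy
    | some partner =>
      simp only [altLoop, h]
      by_cases hc : PySem.Set.contains seen partner = true
      · rw [if_pos hc]
        simp only [true_iff]
        have : partner ∈ seen := by
          simpa [PySem.Set.contains] using hc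
        exact Or.inl ⟨partner, rfl, this⟩
      · rw [if_neg hc]
        have hnotin : partner ∉ seen := by
          intro hmem'
          exact hc (by simpa [PySem.Set.contains] using hmem')
        rw [ih (PySem.Set.add seen a)]
        constructor
        · rintro ⟨pre, x, post, y, rfl, hx, hy⟩
          refine Or.inr ⟨pre, x, post, y, rfl, hx, ?_⟩
          rcases hy with hy | hy
          · rcases (hmem y).mp hy with h' | h'
            · exact Or.inl h'
            · exact Or.inr (Or.inl h')
          · exact Or.inr (Or.inr hy)
        · rintro (⟨y, hx, hy⟩ | ⟨pre, x, post, y, rfl, hx, hy⟩)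
          · injection hx with hx'
            subst hx'
            exact absurd hy hnotin
          · refine ⟨pre, x, post, y, rfl, hx, ?_⟩
            rcases hy with hy | hy | hy
            · exact Or.inl ((hmem y).mpr (Or.inl hy))
            · exact Or.inl ((hmem y).mpr (Or.inr hy))
            · exact Or.inr hy

theorem altLoop_empty_iff (l : List String) :
    altLoop PySem.Set.empty l = true ↔
    ∃ pre x post y, l = pre ++ x :: post ∧ oppDict.get? x = some y ∧ y ∈ pre := by
  rw [altLoop_iff l PySem.Set.empty]
  constructor
  · rintro ⟨pre, x, post, y, hl, hx, hy | hy⟩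
    · exact absurd hy (by simp [PySem.Set.empty])
    · exact ⟨pre, x, post, y, hl, hx, hy⟩
  · rintro ⟨pre, x, post, y, hl, hx, hy⟩
    exact ⟨pre, x, post, y, hl, hx, Or.inr hy⟩

-- EProp, read back-to-front via the involution symmetry
theorem EProp_iff_back (l : List String) :
    EProp l ↔ ∃ pre x post y, l = pre ++ x :: post ∧ oppDict.get? x = some y ∧ y ∈ pre := by
  constructor
  · rintro ⟨pre, x, mid, y, post, rfl, h⟩
    exact ⟨pre ++ x :: mid, y, post, x, by simp, opp_symm h, by simp⟩
  · rintro ⟨pre, x, post, y, rfl, h, hy⟩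
    obtain ⟨s, t, rfl⟩ := List.append_of_mem hy
    exact ⟨s, y, t, x, post, by simp, opp_symm h⟩

-- the two loop bodies agree on an arbitrary window
theorem body_eq (l : List String) :
    (if PySem.List.len l < 2 then false
     else (PySem.List.pyRange 0 (PySem.List.len l - 1) 1).any (fun i =>
       oppDict.contains (PySem.List.pyGetD l i "") &&
       (PySem.List.slice l (some (i + 1)) none).contains
         (oppDict.getD (PySem.List.pyGetD l i "") ""))) =
    altLoop PySem.Set.empty l := by
  simp only [PySem.List.len_eq]
  by_cases hlen : ((l.length : Int) < 2)
  · rw [if_pos hlen]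
    match l, hlen with
    | [], _ => rfl
    | [x], _ =>
      show false = altLoop PySem.Set.empty [x]
      cases h : oppDict.get? x <;>
        simp [altLoop, h, PySem.Set.contains, PySem.Set.empty]
    | x :: y :: t, hlen => simp at hlen; omega
  · rw [if_neg hlen, pyAny_eq_rangeAny, rangeAny_eq_aRec]
    have hiff := (aRec_iff l).trans ((EProp_iff_back l).trans (altLoop_empty_iff l).symm)
    cases ha : aRec l <;> cases hb : altLoop PySem.Set.empty l <;> simp_all

-- ===== VERDICT (by name: the statement is the Claim_ definition above) =====
theorem has_contradictory_actions_py_spec : Claim_equal_has_contradictory_actions_py := by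
  intro history window _
  show has_contradictory_actions_py history window = has_contradictory_actions_py_alt history window
  exact body_eq (if PySem.List.len history ≥ window
                 then PySem.List.slice history (some (-window)) none
                 else history)
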